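-- pv_equiv track=rewrite | github.com/xencryptio/endtoend | system-scaner/Linux Agent/linux_server.py | categorize_ssh_algorithms
-- ===== SOURCE A (Python) =====
-- def categorize_ssh_algorithms(algorithms, algo_type):
--     """Categorize SSH algorithms by type."""
--     categories = {}
--
--     for algo in algorithms:
--         algo_lower = algo.lower()
--
--         if algo_type == "cipher":
--             if "aes" in algo_lower:
--                 if "aes256" in algo_lower:
--                     category = "aes256_ciphers"
--                 elif "aes192" in algo_lower:
--                     category = "aes192_ciphers"
--                 else:
--                     category = "aes128_ciphers"
--             elif "chacha20" in algo_lower: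
--                 category = "chacha20_ciphers"
--             elif "3des" in algo_lower:
--                 category = "3des_ciphers"
--             elif "des" in algo_lower:
--                 category = "des_ciphers"
--             else:
--                 category = "other_ciphers"
--
--         elif algo_type == "mac":
--             if "sha256" in algo_lower:
--                 category = "sha256_macs"
--             elif "sha384" in algo_lower:
--                 category = "sha384_macs"
--             elif "sha512" in algo_lower:
--                 category = "sha512_macs"
--             elif "sha1" in algo_lower:
--                 category = "sha1_macs"
--             elif "md5" in algo_lower:
--                 category = "md5_macs"
--             else:
--                 category = "other_macs"
--
--         elif algo_type == "kex":
--             if "diffie-hellman" in algo_lower: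
--                 category = "diffie_hellman_kex"
--             elif "ecdh" in algo_lower:
--                 category = "ecdh_kex"
--             elif "curve25519" in algo_lower:
--                 category = "curve25519_kex"
--             else:
--                 category = "other_kex"
--
--         else:
--             category = f"other_{algo_type}"
--
--         categories[category] = categories.get(category, [])
--         categories[category].append(algo)
--
--     return categories
-- ===== SOURCE B (Python) =====
-- _RULES = {
--     "cipher": ([("aes256", "aes256_ciphers"), ("aes192", "aes192_ciphers"),
--                 ("aes", "aes128_ciphers"), ("chacha20", "chacha20_ciphers"),
--                 ("3des", "3des_ciphers"), ("des", "des_ciphers")], "other_ciphers"),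
--     "mac": ([("sha256", "sha256_macs"), ("sha384", "sha384_macs"),
--              ("sha512", "sha512_macs"), ("sha1", "sha1_macs"),
--              ("md5", "md5_macs")], "other_macs"),
--     "kex": ([("diffie-hellman", "diffie_hellman_kex"), ("ecdh", "ecdh_kex"),
--              ("curve25519", "curve25519_kex")], "other_kex"),
-- }
--
--
-- def categorize_ssh_algorithms(algorithms, algo_type):
--     """Categorize SSH algorithms by type (rule-table driven)."""
--     rules, default = _RULES.get(algo_type, ([], "other_" + algo_type))
--     categories = {}
--     for algo in algorithms:
--         low = algo.lower()
--         category = next((cat for sub, cat in rules if sub in low), default)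
--         categories.setdefault(category, []).append(algo)
--     return categories
-- ===== Notes on version B (the rewrite author's own statement) =====
-- stated objective: idiomatic
-- what changed: Replaced A's per-type nested if/elif substring chains by a data-driven ordered rule table (algo_type -> list of (substring, category) rules plus a default) scanned for the first match, with the aes256/aes192/aes and 3des/des precedence encoded in the rule order, and get-then-append replaced by setdefault.
import Mathlib
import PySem

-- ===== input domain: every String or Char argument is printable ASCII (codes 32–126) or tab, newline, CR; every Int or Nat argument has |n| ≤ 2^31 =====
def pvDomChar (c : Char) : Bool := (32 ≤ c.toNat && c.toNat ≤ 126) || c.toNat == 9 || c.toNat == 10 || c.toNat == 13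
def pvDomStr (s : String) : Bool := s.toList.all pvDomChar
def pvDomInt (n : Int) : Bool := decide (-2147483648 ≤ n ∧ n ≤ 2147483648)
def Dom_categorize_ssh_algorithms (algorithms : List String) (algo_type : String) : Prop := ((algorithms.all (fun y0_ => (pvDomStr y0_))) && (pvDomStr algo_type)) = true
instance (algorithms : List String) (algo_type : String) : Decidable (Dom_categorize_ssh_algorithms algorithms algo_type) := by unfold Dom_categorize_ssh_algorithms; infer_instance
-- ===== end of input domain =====

-- B replaces A's per-type nested if/elif chains by a single ordered rule table
-- (algo_type → list of (substring, category) rules + default) scanned for the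
-- first match; objective: idiomatic (data-driven), same return value.

-- ===== PORT A =====
-- A computes 'category' inline by nested if/elif chains; transliterated as a helper.
def pvCategoryA (algo_type : String) (algo_lower : String) : String :=
  if algo_type == "cipher" then
    if PySem.Str.isIn "aes" algo_lower then
      if PySem.Str.isIn "aes256" algo_lower then "aes256_ciphers"
      else if PySem.Str.isIn "aes192" algo_lower then "aes192_ciphers"
      else "aes128_ciphers"
    else if PySem.Str.isIn "chacha20" algo_lower then "chacha20_ciphers"
    else if PySem.Str.isIn "3des" algo_lower then "3des_ciphers"
    else if PySem.Str.isIn "des" algo_lower then "des_ciphers"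
    else "other_ciphers"
  else if algo_type == "mac" then
    if PySem.Str.isIn "sha256" algo_lower then "sha256_macs"
    else if PySem.Str.isIn "sha384" algo_lower then "sha384_macs"
    else if PySem.Str.isIn "sha512" algo_lower then "sha512_macs"
    else if PySem.Str.isIn "sha1" algo_lower then "sha1_macs"
    else if PySem.Str.isIn "md5" algo_lower then "md5_macs"
    else "other_macs"
  else if algo_type == "kex" then
    if PySem.Str.isIn "diffie-hellman" algo_lower then "diffie_hellman_kex"
    else if PySem.Str.isIn "ecdh" algo_lower then "ecdh_kex"
    else if PySem.Str.isIn "curve25519" algo_lower then "curve25519_kex"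
    else "other_kex"
  else "other_" ++ algo_type

def categorize_ssh_algorithms (algorithms : List String) (algo_type : String) : List (String × List String) :=
  -- categories[category] = categories.get(category, []); categories[category].append(algo)
  (algorithms.foldl
    (fun categories algo =>
      let category := pvCategoryA algo_type (PySem.Str.lower algo)
      categories.insert category (categories.getD category [] ++ [algo]))
    (PySem.Dict.empty : PySem.Dict String (List String))).items

-- ===== PORT B =====
def pvRuleTable : PySem.Dict String (List (String × String) × String) :=
  PySem.Dict.ofList
    [("cipher", ([("aes256", "aes256_ciphers"), ("aes192", "aes192_ciphers"),
                  ("aes", "aes128_ciphers"), ("chacha20", "chacha20_ciphers"),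
                  ("3des", "3des_ciphers"), ("des", "des_ciphers")], "other_ciphers")),
     ("mac", ([("sha256", "sha256_macs"), ("sha384", "sha384_macs"),
               ("sha512", "sha512_macs"), ("sha1", "sha1_macs"),
               ("md5", "md5_macs")], "other_macs")),
     ("kex", ([("diffie-hellman", "diffie_hellman_kex"), ("ecdh", "ecdh_kex"),
               ("curve25519", "curve25519_kex")], "other_kex"))]

-- next((cat for sub, cat in rules if sub in low), default)
def pvFirstMatch : List (String × String) → String → String → String
  | [], _, dflt => dflt
  | (sub, cat) :: rest, low, dflt =>
      if PySem.Str.isIn sub low then cat else pvFirstMatch rest low dflt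

def categorize_ssh_algorithms_alt (algorithms : List String) (algo_type : String) : List (String × List String) :=
  let rd := pvRuleTable.getD algo_type ([], "other_" ++ algo_type)
  (algorithms.foldl
    (fun categories algo =>
      let category := pvFirstMatch rd.1 (PySem.Str.lower algo) rd.2
      -- categories.setdefault(category, []).append(algo)
      (categories.setdefault category []).modify category [] (fun l => l ++ [algo]))
    (PySem.Dict.empty : PySem.Dict String (List String))).items

-- ===== PRECONDITION & SPEC =====
def Spec_categorize_ssh_algorithms (algorithms : List String) (algo_type : String) (out : List (String × List String)) : Prop := out = categorize_ssh_algorithms_alt algorithms algo_type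
instance (algorithms : List String) (algo_type : String) (out : List (String × List String)) : Decidable (Spec_categorize_ssh_algorithms algorithms algo_type out) := by unfold Spec_categorize_ssh_algorithms; infer_instance

-- ===== CLAIM (what is proved, stated in full; the proofs are below) =====
def Claim_equal_categorize_ssh_algorithms : Prop := ∀ (algorithms : List String) (algo_type : String), Dom_categorize_ssh_algorithms algorithms algo_type → Spec_categorize_ssh_algorithms algorithms algo_type (categorize_ssh_algorithms algorithms algo_type)

-- ===== LEMMAS AND PROOFS =====

-- the two per-algo category computations agree
theorem pv_category_eq (algo_type low : String) :
    pvCategoryA algo_type low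
      = pvFirstMatch (pvRuleTable.getD algo_type ([], "other_" ++ algo_type)).1 low
          (pvRuleTable.getD algo_type ([], "other_" ++ algo_type)).2 := by
  by_cases hc : algo_type = "cipher"
  · subst hc
    rw [show pvRuleTable.getD "cipher" ([], "other_" ++ "cipher")
        = ([("aes256", "aes256_ciphers"), ("aes192", "aes192_ciphers"),
            ("aes", "aes128_ciphers"), ("chacha20", "chacha20_ciphers"),
            ("3des", "3des_ciphers"), ("des", "des_ciphers")], "other_ciphers") from rfl]
    by_cases h256 : PySem.Str.isIn "aes256" low
    · have haes : PySem.Str.isIn "aes" low = true := by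
        rw [PySem.Str.isIn_iff_infix] at *
        exact (by decide : "aes".toList <:+: "aes256".toList).trans h256
      simp at h256 haes
      simp [pvCategoryA, pvFirstMatch, h256, haes]
    · by_cases h192 : PySem.Str.isIn "aes192" low
      · have haes : PySem.Str.isIn "aes" low = true := by
          rw [PySem.Str.isIn_iff_infix] at *
          exact (by decide : "aes".toList <:+: "aes192".toList).trans h192
        simp at h256 h192 haes
        simp [pvCategoryA, pvFirstMatch, h256, h192, haes]
      · simp at h256 h192
        simp [pvCategoryA, pvFirstMatch, h256, h192]
        all_goals rfl
  · by_cases hm : algo_type = "mac"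
    · subst hm
      rw [show pvRuleTable.getD "mac" ([], "other_" ++ "mac")
          = ([("sha256", "sha256_macs"), ("sha384", "sha384_macs"),
              ("sha512", "sha512_macs"), ("sha1", "sha1_macs"),
              ("md5", "md5_macs")], "other_macs") from rfl]
      simp [pvCategoryA, pvFirstMatch]
      all_goals rfl
    · by_cases hk : algo_type = "kex"
      · subst hk
        rw [show pvRuleTable.getD "kex" ([], "other_" ++ "kex")
            = ([("diffie-hellman", "diffie_hellman_kex"), ("ecdh", "ecdh_kex"),
                ("curve25519", "curve25519_kex")], "other_kex") from rfl]
        simp [pvCategoryA, pvFirstMatch]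
        all_goals rfl
      · have hnc : pvRuleTable.contains algo_type = false := by
          have hc' : ¬ "cipher" = algo_type := fun h => hc h.symm
          have hm' : ¬ "mac" = algo_type := fun h => hm h.symm
          have hk' : ¬ "kex" = algo_type := fun h => hk h.symm
          rw [show pvRuleTable = PySem.Dict.mk
              [("cipher", ([("aes256", "aes256_ciphers"), ("aes192", "aes192_ciphers"),
                  ("aes", "aes128_ciphers"), ("chacha20", "chacha20_ciphers"),
                  ("3des", "3des_ciphers"), ("des", "des_ciphers")], "other_ciphers")),
               ("mac", ([("sha256", "sha256_macs"), ("sha384", "sha384_macs"),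
                  ("sha512", "sha512_macs"), ("sha1", "sha1_macs"),
                  ("md5", "md5_macs")], "other_macs")),
               ("kex", ([("diffie-hellman", "diffie_hellman_kex"), ("ecdh", "ecdh_kex"),
                  ("curve25519", "curve25519_kex")], "other_kex"))] from rfl]
          simp [PySem.Dict.contains_mk, hc', hm', hk']
        rw [PySem.Dict.getD_of_not_contains _ _ hnc]
        simp [pvCategoryA, pvFirstMatch, hc, hm, hk]

-- A's get-then-overwrite update equals B's setdefault-then-modify update
theorem pv_step_eq (d : PySem.Dict String (List String)) (k : String) (a : String) :
    d.insert k (d.getD k [] ++ [a])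
      = (d.setdefault k []).modify k [] (fun l => l ++ [a]) := by
  by_cases hcon : d.contains k
  · rw [PySem.Dict.setdefault_of_contains _ _ hcon]
    rfl
  · rw [PySem.Dict.setdefault_of_not_contains _ _ (by simpa using hcon)]
    show _ = (d.insert k []).insert k _
    rw [PySem.Dict.insert_insert_self]
    congr 1
    rw [PySem.Dict.getD_insert_self, PySem.Dict.getD_of_not_contains _ _ (by simpa using hcon)]

theorem pv_foldl_congr {α β : Type} (f g : β → α → β) (h : ∀ b a, f b a = g b a)
    (init : β) (l : List α) : l.foldl f init = l.foldl g init := by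
  induction l generalizing init with
  | nil => rfl
  | cons x xs ih => simp only [List.foldl_cons, h, ih]

-- ===== VERDICT (by name: the statement is the Claim_ definition above) =====
theorem categorize_ssh_algorithms_spec : Claim_equal_categorize_ssh_algorithms := by
  intro algorithms algo_type _
  unfold Spec_categorize_ssh_algorithms categorize_ssh_algorithms categorize_ssh_algorithms_alt
  congr 1
  exact pv_foldl_congr _ _ (fun d algo => by
    simp only [pv_category_eq algo_type (PySem.Str.lower algo), pv_step_eq]) PySem.Dict.empty algorithms
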